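-- pv_equiv track=rewrite | github.com/AndreiHondrari/software-engineering-exploration | data_structures_and_algorithms/01_simple/02_bit_fields/09_02_extract_variable_bitfield_part_from_right.py | extract_bits_from_lsb
-- ===== SOURCE A (Python) =====
-- def extract_bits_from_lsb(
--     value: int,
--     pivot: int,
--     number_of_bits: int
-- ) -> int:
--     # make sure that we deal with maximum 8 bits
--     assert value <= 0b11111111, "bitfield must have a maximum size of 8 bits"
--
--     # make sure the pivot is not out of bound
--     assert pivot <= 7
--
--     # make sure that we are not overflowing with the offset from the pivot
--     MAX_BITS_FROM_PIVOT = 8 - pivot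
--     assert 0 <= number_of_bits <= MAX_BITS_FROM_PIVOT, \
--         "number of bits must be in range 0 .. (8 - pivot)"
--
--     # initialize our extracted bitfield
--     extracted: int = 0b0
--
--     # sweep over the bits from pivot to the right (as many bits as required)
--     for i in range(number_of_bits):
--         nth_bitfield = value & (0b1 << (i + pivot))
--         extracted = extracted | nth_bitfield
--
--     return extracted
-- ===== SOURCE B (Python) =====
-- def extract_bits_from_lsb(
--     value: int,
--     pivot: int,
--     number_of_bits: int
-- ) -> int:
--     # make sure that we deal with maximum 8 bits
--     assert value <= 0b11111111, "bitfield must have a maximum size of 8 bits"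
--
--     # make sure the pivot is not out of bound
--     assert pivot <= 7
--
--     # make sure that we are not overflowing with the offset from the pivot
--     MAX_BITS_FROM_PIVOT = 8 - pivot
--     assert 0 <= number_of_bits <= MAX_BITS_FROM_PIVOT, \
--         "number of bits must be in range 0 .. (8 - pivot)"
--
--     # one closed-form mask of number_of_bits ones, shifted to the pivot
--     return value & (((1 << number_of_bits) - 1) << pivot)
-- ===== Notes on version B (the rewrite author's own statement) =====
-- stated objective: simpler
-- what changed: The per-bit loop that ORs value & (1 << (i+pivot)) one bit at a time is replaced by a single closed-form mask ((1 << number_of_bits) - 1) << pivot ANDed with value in one expression.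
-- outside the precondition, e.g. on extract_bits_from_lsb(5, -3, 0): A returns 0, B raises ValueError
import Mathlib
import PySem

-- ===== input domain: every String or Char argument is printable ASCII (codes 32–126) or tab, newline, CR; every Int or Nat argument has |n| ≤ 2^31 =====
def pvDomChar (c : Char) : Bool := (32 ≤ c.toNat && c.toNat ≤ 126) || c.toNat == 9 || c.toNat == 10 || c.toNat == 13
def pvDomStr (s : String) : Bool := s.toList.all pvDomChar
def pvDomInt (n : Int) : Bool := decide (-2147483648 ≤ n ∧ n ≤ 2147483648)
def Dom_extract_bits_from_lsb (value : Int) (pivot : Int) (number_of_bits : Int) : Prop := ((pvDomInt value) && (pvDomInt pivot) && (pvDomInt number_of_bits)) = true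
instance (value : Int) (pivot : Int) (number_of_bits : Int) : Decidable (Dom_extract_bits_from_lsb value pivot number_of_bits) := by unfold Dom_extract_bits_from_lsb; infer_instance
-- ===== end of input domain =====

-- ===== PORT A =====
-- B replaces A's per-bit OR loop with one closed-form mask ANDed with value (objective: simpler). Return value only; no mutation.
def extract_bits_from_lsb (value : Int) (pivot : Int) (number_of_bits : Int) : Int :=
  -- the three asserts are captured by Pre_; loop 'for i in range(number_of_bits)'
  (PySem.List.pyRange 0 number_of_bits 1).foldl
    (fun extracted i =>
      -- nth_bitfield = value & (0b1 << (i + pivot)); shift exact for i + pivot ≥ 0 (ensured by Pre_; Python raises on a negative shift count)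
      let nth_bitfield := PySem.Int.band value ((1 : Int) <<< (i + pivot).toNat)
      PySem.Int.bor extracted nth_bitfield) 0

-- ===== PORT B =====
def extract_bits_from_lsb_alt (value : Int) (pivot : Int) (number_of_bits : Int) : Int :=
  -- value & (((1 << number_of_bits) - 1) << pivot); shifts exact for the nonnegative counts Pre_ admits
  PySem.Int.band value ((((1 : Int) <<< number_of_bits.toNat) - 1) <<< pivot.toNat)

-- ===== PRECONDITION & SPEC =====
-- Pre_ is exactly A's three asserts (A raises AssertionError outside them) plus 0 ≤ pivot: for pivot < 0, A returns 0 only in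
-- the degenerate number_of_bits = 0 case (the loop body, whose negative shift would raise ValueError, never runs) while B's
-- single mask shift itself raises ValueError there, so those inputs are excluded (cite in claim.json).
def Pre_extract_bits_from_lsb (value : Int) (pivot : Int) (number_of_bits : Int) : Prop :=
  value ≤ 255 ∧ 0 ≤ pivot ∧ pivot ≤ 7 ∧ 0 ≤ number_of_bits ∧ number_of_bits ≤ 8 - pivot
instance (value : Int) (pivot : Int) (number_of_bits : Int) : Decidable (Pre_extract_bits_from_lsb value pivot number_of_bits) := by unfold Pre_extract_bits_from_lsb; infer_instance
def pvWitness_extract_bits_from_lsb : Int × Int × Int := (182, 2, 3)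

def Spec_extract_bits_from_lsb (value : Int) (pivot : Int) (number_of_bits : Int) (out : Int) : Prop := out = extract_bits_from_lsb_alt value pivot number_of_bits
instance (value : Int) (pivot : Int) (number_of_bits : Int) (out : Int) : Decidable (Spec_extract_bits_from_lsb value pivot number_of_bits out) := by unfold Spec_extract_bits_from_lsb; infer_instance

-- ===== CLAIM (what is proved, stated in full; the proofs are below) =====
def Claim_equal_extract_bits_from_lsb : Prop := ∀ (value : Int) (pivot : Int) (number_of_bits : Int), Dom_extract_bits_from_lsb value pivot number_of_bits → Pre_extract_bits_from_lsb value pivot number_of_bits → Spec_extract_bits_from_lsb value pivot number_of_bits (extract_bits_from_lsb value pivot number_of_bits)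

-- ===== LEMMAS AND PROOFS =====

-- bitwise set difference realises Python's  c - (c & m)  (the negative-operand branch of PySem.Int.band)
theorem pv_and_add_ldiff (y x : Nat) : (y &&& x) + Nat.ldiff y x = y := by
  induction y using Nat.binaryRec generalizing x with
  | zero => simp [Nat.ldiff]
  | bit b m ih =>
    rw [← Nat.bit_bodd_div2 x, Nat.land_bit, Nat.ldiff_bit]
    rw [Nat.bit_val, Nat.bit_val, Nat.bit_val]
    have := ih (Nat.div2 x)
    rcases b <;> rcases hb : Nat.bodd x <;> simp <;> omega

theorem pv_band_of_neg (v : Int) (c : Nat) (hv : v < 0) :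
    PySem.Int.band v (c : Int) = (Nat.ldiff c (-v - 1).toNat : Int) := by
  have h1 : ¬ (0 ≤ v) := by omega
  have h2 : (0 : Int) ≤ (c : Int) := Int.natCast_nonneg c
  simp only [PySem.Int.band, h1, h2, if_true, if_false, Int.toNat_natCast]
  have := pv_and_add_ldiff c (-v - 1).toNat
  congr 1
  omega

theorem pv_bor_natCast (a b : Nat) : PySem.Int.bor (a : Int) (b : Int) = ((a ||| b : Nat) : Int) := by
  simp [PySem.Int.bor_natCast]

-- OR of two ANDs with the same value is the AND with the OR of the (nonnegative) masks
theorem pv_band_bor (v : Int) (a b : Nat) :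
    PySem.Int.bor (PySem.Int.band v (a : Int)) (PySem.Int.band v (b : Int))
      = PySem.Int.band v ((a ||| b : Nat) : Int) := by
  rcases Int.lt_or_le v 0 with hv | hv
  · rw [pv_band_of_neg v a hv, pv_band_of_neg v b hv, pv_band_of_neg v _ hv, pv_bor_natCast]
    congr 1
    apply Nat.eq_of_testBit_eq
    intro k
    simp [Nat.testBit_ldiff, Bool.and_or_distrib_right]
  · rw [PySem.Int.band_of_nonneg hv (Int.natCast_nonneg a),
        PySem.Int.band_of_nonneg hv (Int.natCast_nonneg b),
        PySem.Int.band_of_nonneg hv (Int.natCast_nonneg _),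
        Int.toNat_natCast, Int.toNat_natCast, Int.toNat_natCast, pv_bor_natCast]
    congr 1
    apply Nat.eq_of_testBit_eq
    intro k
    simp [Bool.and_or_distrib_left]

theorem pv_one_shift (k : Nat) : ((1 : Int) <<< k) = ((2 ^ k : Nat) : Int) := by
  rw [Int.shiftLeft_eq]
  push_cast
  ring

theorem pv_mask_shift (n p : Nat) : (((2 ^ n : Nat) : Int) - 1) <<< p = (((2 ^ n - 1) * 2 ^ p : Nat) : Int) := by
  rw [Int.shiftLeft_eq]
  have h : (1 : ℕ) ≤ 2 ^ n := Nat.one_le_two_pow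
  push_cast [h]
  ring

-- the mask grows one bit at a time
theorem pv_mask_succ (n p : Nat) :
    ((2 ^ n - 1) * 2 ^ p : Nat) ||| 2 ^ (n + p) = (2 ^ (n + 1) - 1) * 2 ^ p := by
  apply Nat.eq_of_testBit_eq
  intro k
  simp only [Nat.testBit_or, Nat.testBit_mul_two_pow, Nat.testBit_two_pow_sub_one, Nat.testBit_two_pow]
  by_cases hp : p ≤ k
  · by_cases he : n + p = k <;> simp [hp, he] <;> omega
  · simp [hp]
    omega

-- the loop invariant: OR-ing the single-bit ANDs builds the AND with the closed-form mask
theorem pv_loop (v : Int) (p : Nat) : ∀ n : Nat,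
    (List.range n).foldl
      (fun extracted j => PySem.Int.bor extracted (PySem.Int.band v (((2 ^ (j + p) : Nat) : Int)))) 0
      = PySem.Int.band v (((2 ^ n - 1) * 2 ^ p : Nat) : Int) := by
  intro n
  induction n with
  | zero => simp
  | succ n ih =>
    rw [List.range_succ, List.foldl_append, ih]
    simp only [List.foldl_cons, List.foldl_nil]
    rw [pv_band_bor, pv_mask_succ]

theorem pv_main (value pivot number_of_bits : Int)
    (hp : 0 ≤ pivot) (hn : 0 ≤ number_of_bits) :
    extract_bits_from_lsb value pivot number_of_bits
      = extract_bits_from_lsb_alt value pivot number_of_bits := by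
  unfold extract_bits_from_lsb extract_bits_from_lsb_alt
  rw [PySem.List.pyRange_one, List.foldl_map]
  have hfun : (fun (extracted : Int) (k : ℕ) =>
      (fun extracted i =>
        let nth_bitfield := PySem.Int.band value ((1 : Int) <<< (i + pivot).toNat)
        PySem.Int.bor extracted nth_bitfield) extracted ((0 : Int) + (k : Int)))
      = fun (extracted : Int) (j : ℕ) =>
        PySem.Int.bor extracted (PySem.Int.band value (((2 ^ (j + pivot.toNat) : Nat) : Int))) := by
    funext extracted j
    have h1 : ((0 : Int) + (j : Int) + pivot).toNat = j + pivot.toNat := by omega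
    show PySem.Int.bor extracted (PySem.Int.band value ((1 : Int) <<< ((0 : Int) + (j : Int) + pivot).toNat)) = _
    rw [h1, pv_one_shift]
  rw [hfun]
  have h2 : (number_of_bits - 0).toNat = number_of_bits.toNat := by omega
  rw [h2, pv_loop, pv_one_shift, pv_mask_shift]

-- ===== VERDICT (by name: the statement is the Claim_ definition above) =====
theorem extract_bits_from_lsb_spec : Claim_equal_extract_bits_from_lsb := by
  intro value pivot number_of_bits _hdom hpre
  exact pv_main value pivot number_of_bits hpre.2.1 hpre.2.2.2.1
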